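-- pv_equiv track=rewrite | github.com/Arrtyoom/NSI | Z02_FonctionsRecursives/Comment ça vacances/v2 - extract sibblings - GrossSamuel.py | extract_sibbling_chars
-- ===== SOURCE A (Python) =====
-- def extract_sibbling_chars(lst):
--     """ Filtrer la liste "lst" pour ne renvoyer que les chaînes qui comportent
--         au moins deux caractères consécutifs identiques. Exemple:
--
--             Si:                     lst = ['aa','','aA', '', 'n', '.JD!!ac']
--             La fonction renvoie:    ['aa', '.JD!!ac']
--
--         @lst:    liste de chaînes de caractères
--         @return: v. ci-dessus...
--     """
--     # premières questions à vous poser: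
--     #   1) combien de niveaux de boucles ?
--     #       2 niveau de boucles
--     #   2) quels types de boucles ? (for/for+range/while)
--     #       for et for range
--
--     def verif(lst):
--         for i in range(1,len(lst)):
--             if lst[i]==lst[i-1]:
--                 return True
--         return False
--
--     result = []
--     for v in lst:
--         if verif(list(v)):
--             result.append(v)
--     return result
-- ===== SOURCE B (Python) =====
-- def extract_sibbling_chars(lst):
--     # A string has two consecutive identical characters iff, for some character
--     # c occurring in it, the doubled substring c+c occurs in it.
--     return [v for v in lst if any(c + c in v for c in set(v))]
-- ===== Notes on version B (the rewrite author's own statement) =====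
-- stated objective: alternative
-- what changed: Replaces the index-loop adjacent-pair scan with a substring-search formulation: build the set of distinct characters of each string and keep the string iff the doubled substring c+c occurs in it for some such c.
import Mathlib
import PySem

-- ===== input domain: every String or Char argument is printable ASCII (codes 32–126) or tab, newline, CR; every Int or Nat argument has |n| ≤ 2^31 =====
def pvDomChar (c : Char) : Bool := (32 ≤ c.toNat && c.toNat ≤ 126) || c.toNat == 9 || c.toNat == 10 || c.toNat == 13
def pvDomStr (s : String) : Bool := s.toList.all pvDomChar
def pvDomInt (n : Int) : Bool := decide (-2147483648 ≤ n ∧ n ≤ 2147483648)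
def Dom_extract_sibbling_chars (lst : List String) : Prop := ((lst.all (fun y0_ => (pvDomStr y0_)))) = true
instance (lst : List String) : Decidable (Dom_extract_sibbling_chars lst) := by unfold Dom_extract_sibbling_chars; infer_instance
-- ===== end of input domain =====

-- B replaces A's index-loop adjacent scan by a substring search: keep v iff c+c occurs in v for some c in set(v) (alternative, same order/duplicates).


-- ===== PORT A =====
-- inner helper verif: for i in range(1, len(lst)): if lst[i] == lst[i-1]: return True; return False
-- (indices are always in range; pyGetD's default is never read)
def pvVerif (cs : List Char) : Bool :=
  (PySem.List.pyRange 1 (cs.length : Int) 1).any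
    (fun i => PySem.List.pyGetD cs i ' ' == PySem.List.pyGetD cs (i - 1) ' ')

def extract_sibbling_chars (lst : List String) : List String :=
  lst.foldl (fun result v => if pvVerif v.toList then result ++ [v] else result) []

-- ===== PORT B =====
-- per-string test: any(c + c in v for c in set(v)) — doubled-substring search over the distinct characters
def pvHasDouble (v : String) : Bool :=
  (PySem.Set.ofList v.toList).any (fun c => PySem.Chars.isIn [c, c] v.toList)

def extract_sibbling_chars_alt (lst : List String) : List String :=
  lst.filter pvHasDouble

-- ===== PRECONDITION & SPEC =====
def Spec_extract_sibbling_chars (lst : List String) (out : List String) : Prop := out = extract_sibbling_chars_alt lst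
instance (lst : List String) (out : List String) : Decidable (Spec_extract_sibbling_chars lst out) := by unfold Spec_extract_sibbling_chars; infer_instance

-- ===== CLAIM =====
def Claim_equal_extract_sibbling_chars : Prop := ∀ (lst : List String), Dom_extract_sibbling_chars lst → Spec_extract_sibbling_chars lst (extract_sibbling_chars lst)

-- ===== LEMMAS AND PROOFS =====

-- A's index loop over range(1, len) equals the any over adjacent zip pairs
theorem pvVerif_eq_adj (cs : List Char) :
    pvVerif cs = (cs.zip cs.tail).any (fun p => p.1 == p.2) := by
  rw [Bool.eq_iff_iff]
  unfold pvVerif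
  simp only [List.any_eq_true, PySem.List.mem_pyRange_one, beq_iff_eq]
  constructor
  · rintro ⟨i, ⟨h1, h2⟩, heq⟩
    have hi : i.toNat < cs.length := by omega
    rw [PySem.List.pyGetD_eq_getElem cs ' ' (by omega) h2,
        PySem.List.pyGetD_eq_getElem cs ' ' (by omega) (by omega)] at heq
    refine ⟨(cs[i.toNat - 1], cs[i.toNat]), ?_, ?_⟩
    · rw [List.mem_iff_getElem]
      refine ⟨i.toNat - 1, by simp [List.length_zip, List.length_tail]; omega, ?_⟩
      rw [List.getElem_zip]
      have : i.toNat - 1 + 1 = i.toNat := by omega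
      simp [List.getElem_tail, this]
    · have : (i - 1).toNat = i.toNat - 1 := by omega
      simpa [this] using heq.symm
  · rintro ⟨p, hmem, heq⟩
    rw [List.mem_iff_getElem] at hmem
    obtain ⟨k, hk, hp⟩ := hmem
    have hk' : k + 1 < cs.length := by
      simp [List.length_zip, List.length_tail] at hk; omega
    refine ⟨(k : Int) + 1, ⟨by omega, by exact_mod_cast hk'⟩, ?_⟩
    rw [List.getElem_zip] at hp
    rw [PySem.List.pyGetD_eq_getElem cs ' ' (by omega) (by exact_mod_cast hk'),
        PySem.List.pyGetD_eq_getElem cs ' ' (by omega) (by omega)]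
    have e1 : ((k : Int) + 1).toNat = k + 1 := by omega
    have e0 : ((k : Int) + 1 - 1).toNat = k := by omega
    simp only [e1, e0]
    rw [← hp] at heq
    simpa [List.getElem_tail] using heq.symm

-- an adjacent equal pair exists iff some doubled word [c,c] is an infix
theorem adj_iff_double_infix (cs : List Char) :
    (∃ p ∈ cs.zip cs.tail, p.1 = p.2) ↔ ∃ c : Char, [c, c] <:+: cs := by
  constructor
  · rintro ⟨p, hmem, heq⟩
    rw [List.mem_iff_getElem] at hmem
    obtain ⟨k, hk, hp⟩ := hmem
    have hk' : k + 1 < cs.length := by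
      simp [List.length_zip, List.length_tail] at hk; omega
    rw [List.getElem_zip] at hp
    refine ⟨cs[k], cs.take k, cs.drop (k + 2), ?_⟩
    have h2 : cs.drop k = cs[k] :: cs.drop (k + 1) :=
      List.drop_eq_getElem_cons (by omega)
    have h3 : cs.drop (k + 1) = cs[k + 1] :: cs.drop (k + 2) :=
      List.drop_eq_getElem_cons hk'
    have hcc : cs[k + 1] = cs[k] := by
      have := heq; rw [← hp] at this
      simpa [List.getElem_tail] using this.symm
    calc cs.take k ++ [cs[k], cs[k]] ++ cs.drop (k + 2)
        = cs.take k ++ cs.drop k := by rw [h2, h3, hcc]; simp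
      _ = cs := List.take_append_drop k cs
  · rintro ⟨c, s, t, h⟩
    subst h
    refine ⟨(c, c), ?_, rfl⟩
    rw [List.mem_iff_getElem]
    refine ⟨s.length, by simp [List.length_zip, List.length_tail], ?_⟩
    rw [List.getElem_zip]
    simp [List.getElem_tail]

-- the two per-string tests agree
theorem pvVerif_eq_hasDouble (v : String) : pvVerif v.toList = pvHasDouble v := by
  rw [Bool.eq_iff_iff, pvVerif_eq_adj]
  unfold pvHasDouble
  simp only [List.any_eq_true, beq_iff_eq, PySem.Set.mem_ofList,
    PySem.Chars.isIn_iff_infix]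
  rw [adj_iff_double_infix]
  constructor
  · rintro ⟨c, hinf⟩
    exact ⟨c, hinf.subset (by simp), hinf⟩
  · rintro ⟨c, _, hinf⟩
    exact ⟨c, hinf⟩

theorem extract_sibbling_chars_spec : Claim_equal_extract_sibbling_chars := by
  intro lst _
  unfold Spec_extract_sibbling_chars extract_sibbling_chars extract_sibbling_chars_alt
  rw [PySem.List.foldl_append_if_eq_filter]
  simp only [List.nil_append]
  exact List.filter_congr (fun v _ => pvVerif_eq_hasDouble v)
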